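-- pv_equiv track=rewrite | github.com/Abhijit85/WeightedRAG | chunking/processors/table_processor.py | _clean_text_safe
-- ===== SOURCE A (Python) =====
-- def _clean_text_safe(text: str) -> str:
--     """Safe text cleaning without problematic regex"""
--     if not text:
--         return ""
--
--     try:
--         # Simple cleaning without complex regex
--         text = text.replace('\n', ' ').replace('\t', ' ')
--         text = ' '.join(text.split())  # Normalize whitespace
--
--         # Remove obvious non-printable characters
--         text = ''.join(char for char in text if ord(char) >= 32 or char.isspace())
--
--         return text.strip()[:500]  # Limit length
--
--     except Exception:
--         return str(text)[:100]  # Ultimate fallback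
-- ===== SOURCE B (Python) =====
-- def _clean_text_safe(text: str) -> str:
--     """Safe text cleaning without problematic regex (single-pass rewrite)"""
--     if not text:
--         return ""
--
--     try:
--         result = []
--         pending = False
--         for ch in text:
--             if ch.isspace():
--                 if result:
--                     pending = True
--             elif ord(ch) < 32:
--                 continue
--             else:
--                 if pending:
--                     result.append(' ')
--                     pending = False
--                 result.append(ch)
--         return ''.join(result)[:500]
--     except Exception:
--         return str(text)[:100]
-- ===== Notes on version B (the rewrite author's own statement) =====
-- stated objective: alternative
-- what changed: Replaces A's five-stage pipeline (two replace passes, split, join, filter, strip, slice) by a single explicit pass over the characters with an output buffer and a pending-space flag, then one final slice.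
import Mathlib
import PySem

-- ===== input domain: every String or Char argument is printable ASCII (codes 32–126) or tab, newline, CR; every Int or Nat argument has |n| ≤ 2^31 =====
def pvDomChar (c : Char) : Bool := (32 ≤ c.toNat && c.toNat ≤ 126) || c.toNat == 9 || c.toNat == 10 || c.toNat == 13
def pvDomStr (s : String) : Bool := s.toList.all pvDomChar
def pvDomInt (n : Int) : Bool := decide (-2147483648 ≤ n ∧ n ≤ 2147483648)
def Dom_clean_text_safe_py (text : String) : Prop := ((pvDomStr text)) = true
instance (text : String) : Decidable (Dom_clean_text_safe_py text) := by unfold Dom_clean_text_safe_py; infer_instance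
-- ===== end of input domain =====

-- B replaces A's multi-pass pipeline (replace/split/join/filter/strip) by one explicit
-- character pass with an output buffer and a pending-space flag (objective: alternative).


-- ===== PORT A =====
-- literal port of A: replace '\n' and '\t' by ' ', split/join to normalize whitespace,
-- drop chars with ord < 32 that are not whitespace, strip, then [:500]
def clean_text_safe_py (text : String) : String :=
  if text = "" then ""
  else
    let t1 := PySem.Str.replace (PySem.Str.replace text "\n" " ") "\t" " "
    let t2 := PySem.Str.join " " (PySem.Str.split₀ t1)
    let t3 := String.ofList (t2.toList.filter (fun c => 32 ≤ c.toNat || PySem.Chars.isspace c))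
    PySem.Str.slice (PySem.Str.strip t3) none (some 500)

-- ===== PORT B =====
-- one step of B's loop: state = (emitted characters, pending-space flag)
def pvBStep (st : List Char × Bool) (c : Char) : List Char × Bool :=
  if PySem.Chars.isspace c then
    (st.1, if st.1.isEmpty then st.2 else true)
  else if c.toNat < 32 then st
  else
    (st.1 ++ (if st.2 then [' ', c] else [c]), false)

def clean_text_safe_py_alt (text : String) : String :=
  if text = "" then ""
  else
    let st := text.toList.foldl pvBStep ([], false)
    PySem.Str.slice (String.ofList st.1) none (some 500)

-- ===== PRECONDITION & SPEC =====
def Spec_clean_text_safe_py (text : String) (out : String) : Prop := out = clean_text_safe_py_alt text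
instance (text : String) (out : String) : Decidable (Spec_clean_text_safe_py text out) := by unfold Spec_clean_text_safe_py; infer_instance

-- ===== CLAIM (what is proved, stated in full; the proofs are below) =====
def Claim_equal_clean_text_safe_py : Prop := ∀ (text : String), Dom_clean_text_safe_py text → Spec_clean_text_safe_py text (clean_text_safe_py text)

-- ===== LEMMAS AND PROOFS =====

-- a word produced by split(): nonempty, all chars in the domain and not whitespace
def pvWordOK (w : List Char) : Prop :=
  w ≠ [] ∧ ∀ c ∈ w, pvDomChar c = true ∧ PySem.Chars.isspace c = false

-- ---- single-character replace is a map ----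
theorem pv_replace_go_single (a b : Char) :
    ∀ (l : List Char) (fuel : Nat) (acc : List Char), l.length ≤ fuel →
      PySem.Chars.replace.go [a] [b] fuel l acc
        = acc.reverse ++ l.map (fun c => if c = a then b else c) := by
  intro l
  induction l with
  | nil => intro fuel acc _; cases fuel <;> simp [PySem.Chars.replace.go]
  | cons c t ih =>
    intro fuel acc h
    cases fuel with
    | zero => simp at h
    | succ n =>
      have ht : t.length ≤ n := by simpa using h
      by_cases hca : c = a
      · subst hca
        simp only [PySem.Chars.replace.go, List.isPrefixOf, BEq.rfl, Bool.and_self,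
          if_pos]
        simp only [List.length_cons, List.length_nil, Nat.zero_add, List.drop_succ_cons,
          List.drop_zero, List.reverse_cons, List.reverse_nil, List.nil_append]
        rw [show ([b] ++ acc) = b :: acc from rfl, ih n (b :: acc) ht]
        simp
      · have hpre : [a].isPrefixOf (c :: t) = false := by
          simp [List.isPrefixOf]
          exact fun hh => hca (by simpa using hh.symm)
        simp only [PySem.Chars.replace.go, hpre, Bool.false_eq_true, if_false]
        rw [ih n (c :: acc) ht]
        simp [hca]

theorem pv_replace_single (s : List Char) (a b : Char) :
    PySem.Chars.replace s [a] [b] = s.map (fun c => if c = a then b else c) := by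
  simp [PySem.Chars.replace]
  exact pv_replace_go_single a b s s.length [] (le_refl _)

-- ---- intercalate with a single space ----
theorem pv_inter_cons (w : List Char) (ws : List (List Char)) (h : ws ≠ []) :
    List.intercalate [' '] (w :: ws) = w ++ ' ' :: List.intercalate [' '] ws := by
  cases ws with
  | nil => exact absurd rfl h
  | cons v vs => simp [List.intercalate, List.intersperse]

theorem pv_inter_ne_nil : ∀ (ws : List (List Char)), ws ≠ [] → (∀ w ∈ ws, w ≠ []) →
    List.intercalate [' '] ws ≠ [] := by
  intro ws h hw
  cases ws with
  | nil => exact absurd rfl h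
  | cons w vs =>
    cases vs with
    | nil => simpa [List.intercalate] using hw w (by simp)
    | cons v vs' =>
      rw [pv_inter_cons _ _ (by simp)]
      have := hw w (by simp)
      intro hc
      rcases List.append_eq_nil_iff.mp hc with ⟨h1, h2⟩
      exact this h1

theorem pv_inter_snoc : ∀ (xs : List (List Char)) (w : List Char),
    List.intercalate [' '] (xs ++ [w])
      = if xs.isEmpty then w else List.intercalate [' '] xs ++ ' ' :: w := by
  intro xs
  induction xs with
  | nil => intro w; simp [List.intercalate]
  | cons x xs ih =>
    intro w
    rw [List.cons_append, pv_inter_cons _ _ (by simp), ih w]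
    cases xs with
    | nil => simp [List.intercalate]
    | cons v vs =>
      simp only [List.isEmpty_cons, Bool.false_eq_true, if_false]
      rw [pv_inter_cons x (v :: vs) (by simp)]
      simp

theorem pv_inter_mem : ∀ (ws : List (List Char)) (c : Char),
    c ∈ List.intercalate [' '] ws → c = ' ' ∨ ∃ w ∈ ws, c ∈ w := by
  intro ws
  induction ws with
  | nil => intro c hc; simp [List.intercalate] at hc
  | cons w vs ih =>
    intro c hc
    cases vs with
    | nil =>
      simp [List.intercalate] at hc
      exact Or.inr ⟨w, by simp, hc⟩
    | cons v vs' =>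
      rw [pv_inter_cons _ _ (by simp)] at hc
      rcases List.mem_append.mp hc with h1 | h2
      · exact Or.inr ⟨w, by simp, h1⟩
      · rcases List.mem_cons.mp h2 with h3 | h4
        · exact Or.inl h3
        · rcases ih c h4 with h5 | ⟨u, hu, hcu⟩
          · exact Or.inl h5
          · exact Or.inr ⟨u, by simp [hu], hcu⟩

-- ---- split₀.go: invariance under a whitespace-preserving map, and word shape ----
theorem pv_split_go_map (f : Char → Char)
    (hsp : ∀ c, PySem.Chars.isspace (f c) = PySem.Chars.isspace c)
    (hid : ∀ c, PySem.Chars.isspace c = false → f c = c) :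
    ∀ (s cur : List Char) (acc : List (List Char)),
      PySem.Chars.split₀.go (s.map f) cur acc = PySem.Chars.split₀.go s cur acc := by
  intro s
  induction s with
  | nil => intro cur acc; simp
  | cons c t ih =>
    intro cur acc
    simp only [List.map_cons, PySem.Chars.split₀.go, hsp c]
    by_cases hc : PySem.Chars.isspace c = true
    · simp only [hc, if_pos]
      by_cases hcur : cur.isEmpty <;> simp [hcur, ih]
    · have hc' : PySem.Chars.isspace c = false := by simpa using hc
      simp [hc', hid c hc', ih]

theorem pv_split_go_words :
    ∀ (s cur : List Char) (acc : List (List Char)),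
      (∀ c ∈ s, pvDomChar c = true) →
      (∀ c ∈ cur, pvDomChar c = true ∧ PySem.Chars.isspace c = false) →
      (∀ w ∈ acc, pvWordOK w) →
      ∀ w ∈ PySem.Chars.split₀.go s cur acc, pvWordOK w := by
  intro s
  induction s with
  | nil =>
    intro cur acc _ hcur hacc w hw
    simp only [PySem.Chars.split₀.go] at hw
    by_cases hc : cur.isEmpty = true
    · rw [if_pos hc] at hw
      exact hacc w (by simpa using hw)
    · rw [if_neg hc] at hw
      rw [List.mem_reverse, List.mem_cons] at hw
      rcases hw with h1 | h2
      · subst h1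
        have hne : cur ≠ [] := by simpa [List.isEmpty_iff] using hc
        refine ⟨by simpa using hne, ?_⟩
        intro c hcmem; exact hcur c (by simpa using hcmem)
      · exact hacc w h2
  | cons c t ih =>
    intro cur acc hs hcur hacc w hw
    simp only [PySem.Chars.split₀.go] at hw
    by_cases hc : PySem.Chars.isspace c = true
    · rw [if_pos hc] at hw
      by_cases hcr : cur.isEmpty = true
      · rw [if_pos hcr] at hw
        exact ih [] acc (fun x hm => hs x (by simp [hm])) (by simp) hacc w hw
      · rw [if_neg hcr] at hw
        refine ih [] (cur.reverse :: acc) (fun x hm => hs x (by simp [hm])) (by simp) ?_ w hw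
        intro u hu
        rcases List.mem_cons.mp hu with h1 | h2
        · subst h1
          have hne : cur ≠ [] := by simpa [List.isEmpty_iff] using hcr
          exact ⟨by simpa using hne, fun x hm => hcur x (by simpa using hm)⟩
        · exact hacc u h2
    · rw [if_neg hc] at hw
      refine ih (c :: cur) acc (fun x hm => hs x (by simp [hm])) ?_ hacc w hw
      intro x hx
      rcases List.mem_cons.mp hx with h1 | h2
      · rw [h1]; exact ⟨hs c (by simp), by simpa using hc⟩
      · exact hcur x h2

-- a domain character that is not whitespace is printable (code ≥ 32)
theorem pv_dom_nonspace (c : Char) (h1 : pvDomChar c = true)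
    (h2 : PySem.Chars.isspace c = false) : ¬ c.toNat < 32 := by
  simp [pvDomChar] at h1
  simp [PySem.Chars.isspace] at h2
  omega

-- ---- strip is the identity on space-free-bounded strings ----
theorem pv_lstrip_id (l : List Char)
    (h : ∀ c ∈ l.head?, PySem.Chars.isspace c = false) :
    PySem.Chars.lstrip l = l := by
  cases l with
  | nil => rfl
  | cons c t =>
    have := h c (by simp)
    simp [PySem.Chars.lstrip, this]

theorem pv_rstrip_id (l : List Char)
    (h : ∀ c ∈ l.getLast?, PySem.Chars.isspace c = false) :
    PySem.Chars.rstrip l = l := by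
  unfold PySem.Chars.rstrip
  have hl := pv_lstrip_id l.reverse (by simpa [List.head?_reverse] using h)
  unfold PySem.Chars.lstrip at hl
  rw [hl, List.reverse_reverse]

theorem pv_inter_head (ws : List (List Char)) (h : ∀ w ∈ ws, pvWordOK w) :
    ∀ c ∈ (List.intercalate [' '] ws).head?, PySem.Chars.isspace c = false := by
  cases ws with
  | nil => intro c hc; simp [List.intercalate] at hc
  | cons w vs =>
    obtain ⟨hne, hok⟩ := h w (by simp)
    cases w with
    | nil => exact absurd rfl hne
    | cons x w' =>
      intro c hc
      cases vs with
      | nil =>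
        simp [List.intercalate] at hc
        subst hc; exact (hok x (by simp)).2
      | cons v vs' =>
        rw [pv_inter_cons _ _ (by simp)] at hc
        simp at hc
        subst hc; exact (hok x (by simp)).2

theorem pv_inter_last : ∀ (ws : List (List Char)), (∀ w ∈ ws, pvWordOK w) →
    ∀ c ∈ (List.intercalate [' '] ws).getLast?, PySem.Chars.isspace c = false := by
  intro ws
  induction ws with
  | nil => intro _ c hc; simp [List.intercalate] at hc
  | cons w vs ih =>
    intro h c hc
    cases vs with
    | nil =>
      obtain ⟨hne, hok⟩ := h w (by simp)
      simp [List.intercalate] at hc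
      exact (hok c (List.mem_of_getLast? hc)).2
    | cons v vs' =>
      rw [pv_inter_cons _ _ (by simp)] at hc
      have hvne : List.intercalate [' '] (v :: vs') ≠ [] := by
        apply pv_inter_ne_nil _ (by simp)
        intro u hu; exact (h u (by simp [hu])).1
      rw [List.getLast?_append_of_ne_nil w (by simp)] at hc
      have hstep : (' ' :: List.intercalate [' '] (v :: vs')).getLast?
          = (List.intercalate [' '] (v :: vs')).getLast? := by
        cases hx : List.intercalate [' '] (v :: vs') with
        | nil => exact absurd hx hvne
        | cons y ys => simp [List.getLast?_cons_cons]
      rw [hstep] at hc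
      exact ih (fun u hu => h u (by simp [hu])) c hc

-- ---- B's fold computes the joined words of split₀.go ----
theorem pv_fold_go :
    ∀ (s cur : List Char) (acc : List (List Char)) (out : List Char) (pend : Bool),
      (∀ c ∈ s, pvDomChar c = true) →
      (∀ w ∈ acc, w ≠ []) →
      (if cur.isEmpty then
          out = List.intercalate [' '] acc.reverse ∧ pend = !acc.isEmpty
        else
          out = List.intercalate [' '] (acc.reverse ++ [cur.reverse]) ∧ pend = false) →
      (s.foldl pvBStep (out, pend)).1
        = List.intercalate [' '] (PySem.Chars.split₀.go s cur acc) := by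
  intro s
  induction s with
  | nil =>
    intro cur acc out pend _ hacc hinv
    simp only [PySem.Chars.split₀.go, List.foldl_nil]
    by_cases hc : cur.isEmpty = true
    · rw [if_pos hc] at hinv ⊢; exact hinv.1
    · rw [if_neg hc] at hinv ⊢
      rw [List.reverse_cons]
      exact hinv.1
  | cons c t ih =>
    intro cur acc out pend hs hacc hinv
    have hsc : ∀ x ∈ t, pvDomChar x = true := fun x hm => hs x (by simp [hm])
    simp only [PySem.Chars.split₀.go, List.foldl_cons]
    by_cases hc : PySem.Chars.isspace c = true
    · rw [if_pos hc]
      simp only [pvBStep, hc, if_pos]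
      by_cases hcr : cur.isEmpty = true
      · rw [if_pos hcr] at hinv ⊢
        refine ih [] acc _ _ hsc hacc ?_
        simp only [List.isEmpty_nil, if_pos]
        obtain ⟨ho, hp⟩ := hinv
        refine ⟨ho, ?_⟩
        by_cases hae : acc.isEmpty = true
        · have : acc = [] := by simpa [List.isEmpty_iff] using hae
          subst this
          simp [List.intercalate] at ho
          simp [ho, hae, hp]
        · have hane : acc ≠ [] := by simpa [List.isEmpty_iff] using hae
          have hone : out ≠ [] := by
            rw [ho]; exact pv_inter_ne_nil _ (by simpa using hane) (by
              intro u hu; exact hacc u (by simpa using hu))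
          simp [List.isEmpty_iff, hone, hae]
      · rw [if_neg hcr] at hinv ⊢
        obtain ⟨ho, hp⟩ := hinv
        have hcurne : cur ≠ [] := by simpa [List.isEmpty_iff] using hcr
        refine ih [] (cur.reverse :: acc) _ _ hsc ?_ ?_
        · intro u hu
          rcases List.mem_cons.mp hu with h1 | h2
          · subst h1; simpa using hcurne
          · exact hacc u h2
        · simp only [List.isEmpty_nil, if_pos]
          have hone : out ≠ [] := by
            rw [ho]
            refine pv_inter_ne_nil _ (by simp) ?_
            intro u hu
            rcases List.mem_append.mp hu with h1 | h2
            · exact hacc u (by simpa using h1)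
            · simp at h2; subst h2; simpa using hcurne
          constructor
          · rw [ho]; simp
          · simp [List.isEmpty_iff, hone]
    · rw [if_neg hc]
      have hcf : PySem.Chars.isspace c = false := by simpa using hc
      have hdom : pvDomChar c = true := hs c (by simp)
      have h32 : ¬ c.toNat < 32 := pv_dom_nonspace c hdom hcf
      simp only [pvBStep, hcf, Bool.false_eq_true, if_false, h32]
      refine ih (c :: cur) acc _ _ hsc hacc ?_
      simp only [List.isEmpty_cons, Bool.false_eq_true, if_false]
      refine ⟨?_, by simp⟩
      by_cases hcr : cur.isEmpty = true
      · have hcur0 : cur = [] := by simpa [List.isEmpty_iff] using hcr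
        subst hcur0
        rw [if_pos (show (List.isEmpty ([] : List Char)) = true from rfl)] at hinv
        obtain ⟨ho, hp⟩ := hinv
        by_cases hae : acc.isEmpty = true
        · have : acc = [] := by simpa [List.isEmpty_iff] using hae
          subst this
          simp [List.intercalate] at ho
          simp [ho, hp, List.intercalate]
        · have hane : acc ≠ [] := by simpa [List.isEmpty_iff] using hae
          have hone : out ≠ [] := by
            rw [ho]; exact pv_inter_ne_nil _ (by simpa using hane) (by
              intro u hu; exact hacc u (by simpa using hu))
          rw [pv_inter_snoc]
          simp only [List.isEmpty_reverse, hae, Bool.false_eq_true, if_false]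
          have hpt : pend = true := by
            rw [hp]; simp [hane]
          rw [ho, hpt]
          simp
      · rw [if_neg hcr] at hinv
        obtain ⟨ho, hp⟩ := hinv
        rw [pv_inter_snoc] at ho ⊢
        by_cases hae : (acc.reverse).isEmpty = true
        · simp only [hae, if_pos] at ho ⊢
          simp [ho, hp]
        · simp only [hae, Bool.false_eq_true, if_false] at ho ⊢
          simp [ho, hp]

-- every character of the joined words passes A's printable-or-space filter
theorem pv_filter_id (ws : List (List Char)) (h : ∀ w ∈ ws, pvWordOK w) :
    (List.intercalate [' '] ws).filter (fun c => 32 ≤ c.toNat || PySem.Chars.isspace c)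
      = List.intercalate [' '] ws := by
  apply List.filter_eq_self.mpr
  intro c hc
  rcases pv_inter_mem ws c hc with h1 | ⟨w, hw, hcw⟩
  · subst h1; decide
  · obtain ⟨_, hok⟩ := h w hw
    obtain ⟨hd, hsp⟩ := hok c hcw
    have h32 := pv_dom_nonspace c hd hsp
    simp only [Bool.or_eq_true, decide_eq_true_eq]
    omega

-- strip is the identity on the joined words
theorem pv_strip_id (ws : List (List Char)) (h : ∀ w ∈ ws, pvWordOK w) :
    PySem.Chars.strip (List.intercalate [' '] ws) = List.intercalate [' '] ws := by
  unfold PySem.Chars.strip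
  rw [pv_lstrip_id _ (pv_inter_head ws h), pv_rstrip_id _ (pv_inter_last ws h)]

-- the combined effect of A's two single-character replaces
theorem pv_map_repl (cs : List Char) :
    ((cs.map (fun c => if c = '\n' then ' ' else c)).map (fun c => if c = '\t' then ' ' else c))
      = cs.map (fun c => if c = '\t' then ' ' else if c = '\n' then ' ' else c) := by
  rw [List.map_map]
  apply List.map_congr_left
  intro c _
  by_cases h1 : c = '\n'
  · subst h1; rfl
  · by_cases h2 : c = '\t' <;> simp [Function.comp, h1, h2]

theorem pv_main (text : String) (h : pvDomStr text = true) :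
    clean_text_safe_py text = clean_text_safe_py_alt text := by
  unfold clean_text_safe_py clean_text_safe_py_alt
  by_cases h0 : text = ""
  · simp [h0]
  · rw [if_neg h0, if_neg h0]
    apply congrArg (fun s => PySem.Str.slice s none (some 500))
    apply String.toList_inj.mp
    have hdom : ∀ c ∈ text.toList, pvDomChar c = true := by
      simpa [pvDomStr, List.all_eq_true] using h
    have hwords : ∀ w ∈ PySem.Chars.split₀.go text.toList [] [],
        pvWordOK w := pv_split_go_words text.toList [] [] hdom (by simp) (by simp)
    -- A side
    have hA1 : (PySem.Str.replace (PySem.Str.replace text "\n" " ") "\t" " ").toList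
        = text.toList.map (fun c => if c = '\t' then ' ' else if c = '\n' then ' ' else c) := by
      rw [PySem.Str.toList_replace, PySem.Str.toList_replace]
      rw [show ("\n" : String).toList = ['\n'] from rfl,
          show ("\t" : String).toList = ['\t'] from rfl,
          show (" " : String).toList = [' '] from rfl]
      rw [pv_replace_single, pv_replace_single, pv_map_repl]
    have hsplit : PySem.Chars.split₀
        (text.toList.map (fun c => if c = '\t' then ' ' else if c = '\n' then ' ' else c))
        = PySem.Chars.split₀.go text.toList [] [] := by
      show PySem.Chars.split₀.go _ [] [] = _
      apply pv_split_go_map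
      · intro c
        by_cases h1 : c = '\t'
        · subst h1; decide
        · by_cases h2 : c = '\n'
          · subst h2; decide
          · simp [h1, h2]
      · intro c hc
        have h1 : c ≠ '\t' := fun e => absurd hc (by subst e; decide)
        have h2 : c ≠ '\n' := fun e => absurd hc (by subst e; decide)
        simp [h1, h2]
    have hA2 : (PySem.Str.join " " (PySem.Str.split₀
          (PySem.Str.replace (PySem.Str.replace text "\n" " ") "\t" " "))).toList
        = List.intercalate [' '] (PySem.Chars.split₀.go text.toList [] []) := by
      rw [PySem.Str.toList_join, PySem.Str.split₀_map_toList, hA1, hsplit]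
      rfl
    rw [PySem.Str.toList_strip, String.toList_ofList, hA2, pv_filter_id _ hwords,
        pv_strip_id _ hwords, String.toList_ofList]
    -- B side
    rw [pv_fold_go text.toList [] [] [] false hdom (by simp)
        (by simp [List.intercalate])]

-- ===== VERDICT (by name: the statement is the Claim_ definition above) =====
theorem clean_text_safe_py_spec : Claim_equal_clean_text_safe_py := by
  intro text hd
  unfold Spec_clean_text_safe_py
  exact pv_main text hd
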